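-- pv_equiv track=rewrite | github.com/njvz/Introduction-To-Python | ps7/ps7twoD/ps7pr2.py | inner_grid
-- ===== SOURCE A (Python) =====
-- def create_grid(height, width):
--     """ creates and returns a 2-D list of 0s with the specified dimensions.
--         inputs: height and width are non-negative integers
--     """
--     grid = []
--
--     for r in range(height):
--         row = [0] * width     # a row containing width 0s
--         grid += [row]
--
--     return grid
--
-- def inner_grid(height, width, digit):
--     """parameter: height, width, and digit integers
--        Result: grid with given height and width and inner areaa
--        zeros substituted with digits
--     """
--     grid = create_grid(height, width)
--     for r in range(height):
--         for c in range(width):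
--             if r != 0 and r!= (height-1):
--                 if c != 0 and c != (width-1):
--                     grid[r][c] = digit
--     return grid
-- ===== SOURCE B (Python) =====
-- def inner_grid(height, width, digit):
--     # Build the grid as top border + repeated interior row + bottom border,
--     # instead of per-cell nested loops with branching.
--     if height <= 2 or width <= 2:
--         return [[0] * width for _ in range(height)]
--     mid = [0] + [digit] * (width - 2) + [0]
--     return [[0] * width] + [mid[:] for _ in range(height - 2)] + [[0] * width]
-- ===== Notes on version B (the rewrite author's own statement) =====
-- stated objective: idiomatic
-- what changed: Replaces the per-cell nested loops with mutation by a row-level construction: top border row + (height-2) copies of a precomputed interior row [0]+[digit]*(width-2)+[0] + bottom border row, with degenerate heights/widths handled as all-zero rows.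
import Mathlib
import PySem

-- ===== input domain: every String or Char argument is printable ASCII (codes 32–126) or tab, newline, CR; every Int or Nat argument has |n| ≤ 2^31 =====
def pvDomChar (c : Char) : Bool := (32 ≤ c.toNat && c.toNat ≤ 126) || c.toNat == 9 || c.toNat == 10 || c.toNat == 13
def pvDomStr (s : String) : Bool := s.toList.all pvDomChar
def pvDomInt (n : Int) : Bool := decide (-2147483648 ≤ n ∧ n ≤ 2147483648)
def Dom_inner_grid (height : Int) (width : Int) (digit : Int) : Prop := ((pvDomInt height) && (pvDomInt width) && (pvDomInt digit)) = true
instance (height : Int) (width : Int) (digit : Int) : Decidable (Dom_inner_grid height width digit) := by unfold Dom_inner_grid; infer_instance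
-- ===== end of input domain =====

-- B builds the grid as border row + repeated interior row + border row instead of A's per-cell nested loops with mutation (idiomatic decomposition; return value proved equal).

-- ===== PORT A =====
def create_grid (height : Int) (width : Int) : List (List Int) :=
  (PySem.List.pyRange 0 height 1).foldl
    (fun grid _ => grid ++ [PySem.List.pyRepeat [(0 : Int)] width]) []

def inner_grid (height : Int) (width : Int) (digit : Int) : List (List Int) :=
  let grid := create_grid height width
  (PySem.List.pyRange 0 height 1).foldl (fun grid r =>
    (PySem.List.pyRange 0 width 1).foldl (fun grid c =>
      if r ≠ 0 ∧ r ≠ height - 1 then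
        if c ≠ 0 ∧ c ≠ width - 1 then
          PySem.List.pySetD grid r
            (PySem.List.pySetD (PySem.List.pyGetD grid r []) c digit)
        else grid
      else grid) grid) grid

-- ===== PORT B =====
def inner_grid_alt (height : Int) (width : Int) (digit : Int) : List (List Int) :=
  if height ≤ 2 ∨ width ≤ 2 then
    (PySem.List.pyRange 0 height 1).map (fun _ => PySem.List.pyRepeat [(0 : Int)] width)
  else
    [PySem.List.pyRepeat [(0 : Int)] width]
      ++ (PySem.List.pyRange 0 (height - 2) 1).map
           (fun _ => [(0 : Int)] ++ PySem.List.pyRepeat [digit] (width - 2) ++ [(0 : Int)])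
      ++ [PySem.List.pyRepeat [(0 : Int)] width]

-- ===== PRECONDITION & SPEC =====
def Spec_inner_grid (height : Int) (width : Int) (digit : Int) (out : List (List Int)) : Prop := out = inner_grid_alt height width digit
instance (height : Int) (width : Int) (digit : Int) (out : List (List Int)) : Decidable (Spec_inner_grid height width digit out) := by unfold Spec_inner_grid; infer_instance

-- ===== CLAIM (what is proved, stated in full; the proofs are below) =====
def Claim_equal_inner_grid : Prop := ∀ (height : Int) (width : Int) (digit : Int), Dom_inner_grid height width digit → Spec_inner_grid height width digit (inner_grid height width digit)

-- ===== LEMMAS AND PROOFS =====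

-- the row of zeros, and the fully processed interior row, as index maps
def pvZeroRow (width : Int) : List Int := List.replicate width.toNat (0 : Int)

def pvMidRow (width : Int) (digit : Int) : List Int :=
  (List.range width.toNat).map (fun j => if 0 < j ∧ j + 1 < width.toNat then digit else 0)

lemma pv_foldl_id {α β : Type} : ∀ (l : List β) (g : α), l.foldl (fun g _ => g) g = g := by
  intro l; induction l with
  | nil => intro g; rfl
  | cons c cs ih => intro g; simp [ih g]

lemma pv_foldl_append_const {α β : Type} (x : α) : ∀ (l : List β) (acc : List α),
    l.foldl (fun g _ => g ++ [x]) acc = acc ++ List.replicate l.length x := by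
  intro l; induction l with
  | nil => intro acc; simp
  | cons c cs ih =>
    intro acc
    rw [List.foldl_cons, ih, List.append_assoc, List.length_cons, List.singleton_append,
      ← List.replicate_succ]

lemma pv_create_grid_eq (h w : Int) :
    create_grid h w = List.replicate h.toNat (pvZeroRow w) := by
  unfold create_grid pvZeroRow
  rw [PySem.List.pyRepeat_singleton, pv_foldl_append_const]
  simp [PySem.List.length_pyRange_one]

-- the inner c-loop on an all-zero row, prefix by prefix
lemma pv_rowFold_upto (w d : Int) (k : Nat) (hk : k ≤ w.toNat) :
    (PySem.List.pyRange 0 (k : Int) 1).foldl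
      (fun row c => if c ≠ 0 ∧ c ≠ w - 1 then PySem.List.pySetD row c d else row)
      (pvZeroRow w)
    = (List.range w.toNat).map (fun j => if 0 < j ∧ j < k ∧ j + 1 < w.toNat then d else 0) := by
  induction k with
  | zero =>
    rw [Nat.cast_zero, PySem.List.pyRange_one_eq_nil (le_refl (0:Int))]
    unfold pvZeroRow
    apply List.ext_getElem <;> simp
  | succ k ih =>
    have hk' : k ≤ w.toNat := Nat.le_of_succ_le hk
    have h0k : (0:Int) ≤ (k:Int) := by positivity
    rw [show ((k+1:Nat):Int) = (k:Int)+1 by push_cast; ring]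
    rw [PySem.List.pyRange_one_succ_right h0k, List.foldl_append, ih hk']
    simp only [List.foldl_cons, List.foldl_nil]
    by_cases hc : (k:Int) ≠ 0 ∧ (k:Int) ≠ w - 1
    · rw [if_pos hc, PySem.List.pySetD_natCast]
      have hc1 := hc.1; have hc2 := hc.2
      apply List.ext_getElem
      · simp
      intro i hi hi'
      simp only [List.getElem_set, List.getElem_map, List.getElem_range]
      simp only [List.length_set, List.length_map, List.length_range] at hi
      by_cases hik : k = i
      · subst hik
        rw [if_pos rfl, if_pos (by omega)]
      · rw [if_neg hik]
        rw [if_congr (show (0 < i ∧ i < k ∧ i + 1 < w.toNat) ↔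
              (0 < i ∧ i < k+1 ∧ i + 1 < w.toNat) by omega) rfl rfl]
    · rw [if_neg hc]
      apply List.map_congr_left
      intro j hj
      rw [List.mem_range] at hj
      rcases not_and_or.mp hc with h1 | h1
      · have hk0 : (k:Int) = 0 := by simpa using h1
        rw [if_congr (show (0 < j ∧ j < k ∧ j + 1 < w.toNat) ↔
              (0 < j ∧ j < k+1 ∧ j + 1 < w.toNat) by omega) rfl rfl]
      · have hkw : (k:Int) = w - 1 := by simpa using h1
        rw [if_congr (show (0 < j ∧ j < k ∧ j + 1 < w.toNat) ↔
              (0 < j ∧ j < k+1 ∧ j + 1 < w.toNat) by omega) rfl rfl]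

lemma pv_rowFold_eq (w d : Int) :
    (PySem.List.pyRange 0 w 1).foldl
      (fun row c => if c ≠ 0 ∧ c ≠ w - 1 then PySem.List.pySetD row c d else row)
      (pvZeroRow w)
    = pvMidRow w d := by
  by_cases hw : w ≤ 0
  · have h0 : w.toNat = 0 := by omega
    rw [PySem.List.pyRange_one_eq_nil hw]
    simp [pvZeroRow, pvMidRow, h0]
  · rw [show PySem.List.pyRange 0 w 1 = PySem.List.pyRange 0 ((w.toNat : Nat) : Int) 1 by
        congr 1; omega]
    rw [pv_rowFold_upto w d w.toNat (le_refl _)]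
    unfold pvMidRow
    apply List.map_congr_left
    intro j hj
    rw [List.mem_range] at hj
    rw [if_congr (show (0 < j ∧ j < w.toNat ∧ j + 1 < w.toNat) ↔
          (0 < j ∧ j + 1 < w.toNat) by omega) rfl rfl]

-- the inner c-loop on the whole grid is a single row update
lemma pv_foldl_setrow (d r : Int) (Q : Int → Prop) [DecidablePred Q] :
    ∀ (l : List Int) (g : List (List Int)) (i : Nat), r = (i : Int) → i < g.length →
      l.foldl (fun g c => if Q c then
          PySem.List.pySetD g r (PySem.List.pySetD (PySem.List.pyGetD g r []) c d) else g) g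
      = g.set i (l.foldl (fun row c => if Q c then PySem.List.pySetD row c d else row)
          (PySem.List.pyGetD g r [])) := by
  intro l
  induction l with
  | nil =>
    intro g i hr hi; subst hr
    rw [List.foldl_nil, List.foldl_nil,
      PySem.List.pyGetD_eq_getElem g [] (by positivity) (by simpa using hi)]
    simp [List.set_getElem_self]
  | cons c cs ih =>
    intro g i hr hi; subst hr
    by_cases hq : Q c
    · simp only [List.foldl_cons, if_pos hq]
      rw [ih _ i rfl (by rw [PySem.List.length_pySetD]; exact hi)]
      rw [show PySem.List.pyGetD (PySem.List.pySetD g (↑i)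
            (PySem.List.pySetD (PySem.List.pyGetD g (↑i) []) c d)) (↑i) []
          = PySem.List.pySetD (PySem.List.pyGetD g (↑i) []) c d by
        rw [PySem.List.pyGetD_pySetD_natCast g i i _ [] hi]; simp]
      rw [PySem.List.pySetD_natCast, List.set_set]
    · simp only [List.foldl_cons, if_neg hq]
      exact ih g i rfl hi

-- the outer r-loop, prefix by prefix
lemma pv_gridFold_upto (h w d : Int) (k : Nat) (hk : k ≤ h.toNat) :
    (PySem.List.pyRange 0 (k : Int) 1).foldl (fun grid r =>
      (PySem.List.pyRange 0 w 1).foldl (fun grid c =>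
        if r ≠ 0 ∧ r ≠ h - 1 then
          if c ≠ 0 ∧ c ≠ w - 1 then
            PySem.List.pySetD grid r
              (PySem.List.pySetD (PySem.List.pyGetD grid r []) c d)
          else grid
        else grid) grid) (List.replicate h.toNat (pvZeroRow w))
    = (List.range h.toNat).map
        (fun i => if 0 < i ∧ i < k ∧ i + 1 < h.toNat then pvMidRow w d else pvZeroRow w) := by
  induction k with
  | zero =>
    rw [Nat.cast_zero, PySem.List.pyRange_one_eq_nil (le_refl (0:Int))]
    apply List.ext_getElem <;> simp
  | succ k ih =>
    have hk' : k ≤ h.toNat := Nat.le_of_succ_le hk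
    have h0k : (0:Int) ≤ (k:Int) := by positivity
    rw [show ((k+1:Nat):Int) = (k:Int)+1 by push_cast; ring]
    rw [PySem.List.pyRange_one_succ_right h0k, List.foldl_append, ih hk']
    simp only [List.foldl_cons, List.foldl_nil]
    by_cases hc : (k:Int) ≠ 0 ∧ (k:Int) ≠ h - 1
    · rw [show (fun (grid : List (List Int)) c =>
          if (k:Int) ≠ 0 ∧ (k:Int) ≠ h - 1 then
            if c ≠ 0 ∧ c ≠ w - 1 then
              PySem.List.pySetD grid (↑k)
                (PySem.List.pySetD (PySem.List.pyGetD grid (↑k) []) c d)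
            else grid
          else grid)
        = fun (grid : List (List Int)) c =>
            if c ≠ 0 ∧ c ≠ w - 1 then
              PySem.List.pySetD grid (↑k)
                (PySem.List.pySetD (PySem.List.pyGetD grid (↑k) []) c d)
            else grid by
          funext g c; rw [if_pos hc]]
      rw [pv_foldl_setrow d (↑k) (fun c => c ≠ 0 ∧ c ≠ w - 1) _ _ k rfl
          (by simp; omega)]
      rw [show PySem.List.pyGetD ((List.range h.toNat).map
            (fun i => if 0 < i ∧ i < k ∧ i + 1 < h.toNat then pvMidRow w d else pvZeroRow w))
            (↑k) []
          = pvZeroRow w by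
        rw [PySem.List.pyGetD_eq_getElem _ [] (by positivity) (by simp; omega)]
        simp]
      rw [pv_rowFold_eq]
      have hc1 := hc.1; have hc2 := hc.2
      apply List.ext_getElem
      · simp
      intro i hi hi'
      simp only [List.getElem_set, List.getElem_map, List.getElem_range]
      simp only [List.length_set, List.length_map, List.length_range] at hi
      by_cases hik : k = i
      · subst hik
        rw [if_pos rfl, if_pos (by omega)]
      · rw [if_neg hik]
        rw [if_congr (show (0 < i ∧ i < k ∧ i + 1 < h.toNat) ↔
              (0 < i ∧ i < k+1 ∧ i + 1 < h.toNat) by omega) rfl rfl]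
    · rw [show (fun (grid : List (List Int)) c =>
          if (k:Int) ≠ 0 ∧ (k:Int) ≠ h - 1 then
            if c ≠ 0 ∧ c ≠ w - 1 then
              PySem.List.pySetD grid (↑k)
                (PySem.List.pySetD (PySem.List.pyGetD grid (↑k) []) c d)
            else grid
          else grid)
        = fun (grid : List (List Int)) _ => grid by
          funext g c; rw [if_neg hc]]
      rw [pv_foldl_id]
      apply List.map_congr_left
      intro j hj
      rw [List.mem_range] at hj
      rcases not_and_or.mp hc with h1 | h1
      · have hk0 : (k:Int) = 0 := by simpa using h1
        rw [if_congr (show (0 < j ∧ j < k ∧ j + 1 < h.toNat) ↔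
              (0 < j ∧ j < k+1 ∧ j + 1 < h.toNat) by omega) rfl rfl]
      · have hkh : (k:Int) = h - 1 := by simpa using h1
        rw [if_congr (show (0 < j ∧ j < k ∧ j + 1 < h.toNat) ↔
              (0 < j ∧ j < k+1 ∧ j + 1 < h.toNat) by omega) rfl rfl]

lemma pv_inner_grid_eq (h w d : Int) :
    inner_grid h w d
    = (List.range h.toNat).map
        (fun i => if 0 < i ∧ i + 1 < h.toNat then pvMidRow w d else pvZeroRow w) := by
  unfold inner_grid
  rw [pv_create_grid_eq]
  by_cases hh : h ≤ 0
  · have h0 : h.toNat = 0 := by omega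
    rw [PySem.List.pyRange_one_eq_nil hh]
    simp [h0]
  · rw [show PySem.List.pyRange 0 h 1 = PySem.List.pyRange 0 ((h.toNat : Nat) : Int) 1 by
        congr 1; omega]
    rw [pv_gridFold_upto h w d h.toNat (le_refl _)]
    apply List.map_congr_left
    intro j hj
    rw [List.mem_range] at hj
    rw [if_congr (show (0 < j ∧ j < h.toNat ∧ j + 1 < h.toNat) ↔
          (0 < j ∧ j + 1 < h.toNat) by omega) rfl rfl]

lemma pv_midRow_eq_zeroRow (w d : Int) (hw : w ≤ 2) : pvMidRow w d = pvZeroRow w := by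
  unfold pvMidRow pvZeroRow
  apply List.ext_getElem
  · simp
  intro i hi hi'
  simp only [List.getElem_map, List.getElem_range, List.getElem_replicate]
  rw [if_neg (by omega)]

lemma pv_midRow_eq_concat (w d : Int) (hw : 2 < w) :
    pvMidRow w d = [(0:Int)] ++ List.replicate (w-2).toNat d ++ [(0:Int)] := by
  unfold pvMidRow
  apply List.ext_getElem
  · simp; omega
  intro i hi hi'
  simp only [List.getElem_map, List.getElem_range]
  simp only [List.length_map, List.length_range] at hi
  rcases Nat.lt_or_ge i 1 with h1 | h1
  · have : i = 0 := by omega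
    subst this
    simp
  · rcases Nat.lt_or_ge i (1 + (w-2).toNat) with h2 | h2
    · rw [List.getElem_append_left (by simp; omega), List.getElem_append_right (by simpa using h1)]
      simp only [List.length_singleton, List.getElem_replicate]
      rw [if_pos (by omega)]
    · rw [List.getElem_append_right (by simp; omega)]
      simp only [List.length_append, List.length_singleton, List.length_replicate]
      rw [if_neg (by omega)]
      simp
-- ===== VERDICT (by name: the statement is the Claim_ definition above) =====
theorem inner_grid_spec : Claim_equal_inner_grid := by
  intro h w d _
  unfold Spec_inner_grid inner_grid_alt
  rw [pv_inner_grid_eq, PySem.List.pyRepeat_singleton]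
  by_cases hcase : h ≤ 2 ∨ w ≤ 2
  · rw [if_pos hcase]
    rw [PySem.List.pyRange_one, List.map_map]
    simp only [Int.sub_zero]
    apply List.map_congr_left
    intro i hi
    rw [List.mem_range] at hi
    rcases hcase with hc | hc
    · rw [if_neg (by omega)]; rfl
    · rw [pv_midRow_eq_zeroRow w d hc]
      split <;> rfl
  · rw [if_neg hcase]
    rw [not_or] at hcase
    simp only [not_le] at hcase
    obtain ⟨hh, hw⟩ := hcase
    rw [PySem.List.pyRepeat_singleton, PySem.List.pyRange_one, List.map_map]
    simp only [Int.sub_zero]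
    apply List.ext_getElem
    · simp [pvZeroRow]; omega
    intro i hi hi'
    simp only [List.getElem_map, List.getElem_range]
    simp only [List.length_map, List.length_range] at hi
    rcases Nat.lt_or_ge i 1 with h1 | h1
    · have : i = 0 := by omega
      subst this
      rw [if_neg (by omega)]
      simp [pvZeroRow]
    · rcases Nat.lt_or_ge i (1 + (h-2).toNat) with h2 | h2
      · rw [List.getElem_append_left (by simp; omega), List.getElem_append_right (by simpa using h1)]
        simp only [List.length_singleton, List.getElem_map, List.getElem_range]
        rw [if_pos (by omega), pv_midRow_eq_concat w d hw]
        rfl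
      · rw [List.getElem_append_right (by simp; omega)]
        rw [if_neg (by omega)]
        simp [pvZeroRow]
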